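-- pv_equiv track=rewrite | github.com/BadWolf1023/QueueBotMultiServer | cogs/Queue.py | lounge_get_ranking_file_name
-- ===== SOURCE A (Python) =====
-- lounge_folder_path = ''
--
-- lounge_runner_cutoff_filename = [(999, 'iron.png', "<:Iron:801548182415867954>"),
--                           (1999, 'bronze.png', "<:Bronze:801548182298689546>"),
--                           (3999, 'silver.png', "<:Silver:801548182286762096>"),
--                           (5999, 'gold.png', "<:Gold:801548182747086868>"),
--                           (7999, 'platinum.png', "<:Platinum:801548183372169256>"),
--                           (9999, 'diamond.png', "<:Diamond:801548182319792168>"),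
--                           (9999999,'master.png', "<:Master:801548182416261120>")]
--
-- lounge_bagger_cutoff_filename = [(499, 'iron.png', "<:Iron:801548182415867954>"),
--                           (999, 'bronze.png', "<:Bronze:801548182298689546>"),
--                           (1999, 'silver.png', "<:Silver:801548182286762096>"),
--                           (2999, 'gold.png', "<:Gold:801548182747086868>"),
--                           (3999, 'platinum.png', "<:Platinum:801548183372169256>"),
--                           (4999, 'diamond.png', "<:Diamond:801548182319792168>"),
--                           (9999999,'master.png', "<:Master:801548182416261120>")]
--
-- def lounge_get_ranking_file_name(mmr:int, primary_rating=True):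
--     to_use = lounge_runner_cutoff_filename if primary_rating else lounge_bagger_cutoff_filename
--     mmr_icon_data = (to_use[-1][1], to_use[-1][2])
--     for cutoff, file_name_path, discord_emoji  in to_use[:-1]:
--         if mmr <= cutoff:
--             mmr_icon_data = (lounge_folder_path + file_name_path, discord_emoji)
--             break
--     return mmr_icon_data
-- ===== SOURCE B (Python) =====
-- import bisect
--
-- lounge_folder_path = ''
--
-- lounge_runner_cutoff_filename = [(999, 'iron.png', "<:Iron:801548182415867954>"),
--                           (1999, 'bronze.png', "<:Bronze:801548182298689546>"),
--                           (3999, 'silver.png', "<:Silver:801548182286762096>"),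
--                           (5999, 'gold.png', "<:Gold:801548182747086868>"),
--                           (7999, 'platinum.png', "<:Platinum:801548183372169256>"),
--                           (9999, 'diamond.png', "<:Diamond:801548182319792168>"),
--                           (9999999,'master.png', "<:Master:801548182416261120>")]
--
-- lounge_bagger_cutoff_filename = [(499, 'iron.png', "<:Iron:801548182415867954>"),
--                           (999, 'bronze.png', "<:Bronze:801548182298689546>"),
--                           (1999, 'silver.png', "<:Silver:801548182286762096>"),
--                           (2999, 'gold.png', "<:Gold:801548182747086868>"),
--                           (3999, 'platinum.png', "<:Platinum:801548183372169256>"),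
--                           (4999, 'diamond.png', "<:Diamond:801548182319792168>"),
--                           (9999999,'master.png', "<:Master:801548182416261120>")]
--
-- def lounge_get_ranking_file_name(mmr: int, primary_rating=True):
--     table = lounge_runner_cutoff_filename if primary_rating else lounge_bagger_cutoff_filename
--     cutoffs = [row[0] for row in table]
--     idx = min(bisect.bisect_left(cutoffs, mmr), len(table) - 1)
--     _, file_name, emoji = table[idx]
--     return (lounge_folder_path + file_name, emoji)
-- ===== Notes on version B (the rewrite author's own statement) =====
-- stated objective: idiomatic
-- what changed: Replaces the linear scan-with-break (with the master row as a pre-loop default) by bisect.bisect_left binary search over the precomputed cutoff column, with the index clamped to the last row.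
import Mathlib
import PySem

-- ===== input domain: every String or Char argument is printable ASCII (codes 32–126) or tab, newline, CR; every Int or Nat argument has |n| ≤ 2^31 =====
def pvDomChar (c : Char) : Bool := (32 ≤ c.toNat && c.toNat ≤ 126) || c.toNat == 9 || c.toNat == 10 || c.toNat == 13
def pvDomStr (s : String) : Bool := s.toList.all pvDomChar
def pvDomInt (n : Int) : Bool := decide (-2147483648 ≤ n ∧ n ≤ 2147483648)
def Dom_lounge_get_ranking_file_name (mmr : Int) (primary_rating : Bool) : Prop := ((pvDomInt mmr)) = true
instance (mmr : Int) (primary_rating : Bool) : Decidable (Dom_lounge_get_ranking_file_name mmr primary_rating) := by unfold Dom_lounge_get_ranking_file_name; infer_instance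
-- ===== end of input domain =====

-- B replaces A's linear scan-with-break (master as a pre-loop default) by a binary search
-- (bisect_left) over the cutoff column with the index clamped to the last row; objective: idiomatic.

-- ===== PORT A =====
def pvLoungeFolderPath : String := ""

def pvRunnerTable : List (Int × String × String) :=
  [(999, "iron.png", "<:Iron:801548182415867954>"),
   (1999, "bronze.png", "<:Bronze:801548182298689546>"),
   (3999, "silver.png", "<:Silver:801548182286762096>"),
   (5999, "gold.png", "<:Gold:801548182747086868>"),
   (7999, "platinum.png", "<:Platinum:801548183372169256>"),
   (9999, "diamond.png", "<:Diamond:801548182319792168>"),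
   (9999999, "master.png", "<:Master:801548182416261120>")]

def pvBaggerTable : List (Int × String × String) :=
  [(499, "iron.png", "<:Iron:801548182415867954>"),
   (999, "bronze.png", "<:Bronze:801548182298689546>"),
   (1999, "silver.png", "<:Silver:801548182286762096>"),
   (2999, "gold.png", "<:Gold:801548182747086868>"),
   (3999, "platinum.png", "<:Platinum:801548183372169256>"),
   (4999, "diamond.png", "<:Diamond:801548182319792168>"),
   (9999999, "master.png", "<:Master:801548182416261120>")]

-- the for-loop with break: first row of the slice whose cutoff ≥ mmr, else the default
def pvLoopA (mmr : Int) (rows : List (Int × String × String)) (acc : String × String) : String × String :=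
  match rows with
  | [] => acc
  | (cutoff, file_name_path, discord_emoji) :: rest =>
      if mmr ≤ cutoff then (pvLoungeFolderPath ++ file_name_path, discord_emoji)
      else pvLoopA mmr rest acc

def lounge_get_ranking_file_name (mmr : Int) (primary_rating : Bool) : String × String :=
  let to_use := if primary_rating then pvRunnerTable else pvBaggerTable
  let last := to_use.getLastD (0, "", "")
  let mmr_icon_data : String × String := (last.2.1, last.2.2)
  pvLoopA mmr (PySem.List.slice to_use none (some (-1))) mmr_icon_data

-- ===== PORT B =====
-- bisect.bisect_left on a list of Ints: binary search, ported step for step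
def pvBisectLeft (cutoffs : List Int) (x : Int) (lo hi : Nat) : Nat :=
  if h : lo < hi then
    let mid := (lo + hi) / 2
    if cutoffs.getD mid 0 < x then pvBisectLeft cutoffs x (mid + 1) hi
    else pvBisectLeft cutoffs x lo mid
  else lo
  termination_by hi - lo
  decreasing_by all_goals omega

def lounge_get_ranking_file_name_alt (mmr : Int) (primary_rating : Bool) : String × String :=
  let table := if primary_rating then pvRunnerTable else pvBaggerTable
  let cutoffs := table.map (·.1)
  let idx := min (pvBisectLeft cutoffs mmr 0 cutoffs.length) (table.length - 1)
  let row := table.getD idx (0, "", "")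
  (pvLoungeFolderPath ++ row.2.1, row.2.2)

-- ===== PRECONDITION & SPEC =====
def Spec_lounge_get_ranking_file_name (mmr : Int) (primary_rating : Bool) (out : String × String) : Prop := out = lounge_get_ranking_file_name_alt mmr primary_rating
instance (mmr : Int) (primary_rating : Bool) (out : String × String) : Decidable (Spec_lounge_get_ranking_file_name mmr primary_rating out) := by unfold Spec_lounge_get_ranking_file_name; infer_instance

-- ===== CLAIM (what is proved, stated in full; the proofs are below) =====
def Claim_equal_lounge_get_ranking_file_name : Prop := ∀ (mmr : Int) (primary_rating : Bool), Dom_lounge_get_ranking_file_name mmr primary_rating → Spec_lounge_get_ranking_file_name mmr primary_rating (lounge_get_ranking_file_name mmr primary_rating)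

-- ===== LEMMAS AND PROOFS =====
theorem pvBisectLeft_step (c : List Int) (x : Int) (lo hi : Nat) (h : lo < hi) :
    pvBisectLeft c x lo hi =
      if c.getD ((lo + hi) / 2) 0 < x then pvBisectLeft c x ((lo + hi) / 2 + 1) hi
      else pvBisectLeft c x lo ((lo + hi) / 2) := by
  rw [pvBisectLeft]; simp [h]

theorem pvBisectLeft_end (c : List Int) (x : Int) (lo : Nat) :
    pvBisectLeft c x lo lo = lo := by
  rw [pvBisectLeft]; simp

-- ===== VERDICT (by name: the statement is the Claim_ definition above) =====
theorem lounge_get_ranking_file_name_spec : Claim_equal_lounge_get_ranking_file_name := by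
  intro mmr primary_rating _
  unfold Spec_lounge_get_ranking_file_name
  cases primary_rating <;>
    · simp only [lounge_get_ranking_file_name, lounge_get_ranking_file_name_alt,
        pvRunnerTable, pvBaggerTable, pvLoungeFolderPath]
      rw [PySem.List.slice_to_neg_one]
      simp [pvLoopA, pvBisectLeft_step, pvBisectLeft_end, List.getD]
      split_ifs <;> first | rfl | omega
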